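-- pv_equiv track=rewrite | github.com/eunjiJeong729/eunjiJeong | coding test/HIndex.py | solution
-- ===== SOURCE A (Python) =====
-- def solution(citations):
--     answer = 0
--     point = 1
--     while point <= len(citations):
--         temp = sorted(citations)
--         small_cnt = 0
--         big_cnt = 0
--         for i in temp :
--             if i <= point : small_cnt += 1
--             if i >= point : big_cnt += 1
--
--         if small_cnt == big_cnt : answer = point
--         point += 1
--
--     return answer
-- ===== SOURCE B (Python) =====
-- def solution(citations):
--     n = len(citations)
--     if n == 0:
--         return 0
--
--     def imbalance(p):
--         le = sum(1 for c in citations if c <= p)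
--         ge = sum(1 for c in citations if c >= p)
--         return le - ge
--
--     # imbalance is nondecreasing in p, so the points with imbalance == 0
--     # form a contiguous (possibly empty) range: binary-search its upper end.
--     if imbalance(1) > 0:
--         return 0
--     lo, hi = 1, n
--     while lo < hi:
--         mid = (lo + hi + 1) // 2
--         if imbalance(mid) <= 0:
--             lo = mid
--         else:
--             hi = mid - 1
--     return lo if imbalance(lo) == 0 else 0
-- ===== Notes on version B (the rewrite author's own statement) =====
-- stated objective: faster
-- what changed: Instead of re-sorting and re-counting for every candidate point, B uses the monotonicity of (count<=p) - (count>=p) in p to binary-search the last point where the two counts are equal, with one O(n) counting pass per probe and no sorting.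
import Mathlib
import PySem

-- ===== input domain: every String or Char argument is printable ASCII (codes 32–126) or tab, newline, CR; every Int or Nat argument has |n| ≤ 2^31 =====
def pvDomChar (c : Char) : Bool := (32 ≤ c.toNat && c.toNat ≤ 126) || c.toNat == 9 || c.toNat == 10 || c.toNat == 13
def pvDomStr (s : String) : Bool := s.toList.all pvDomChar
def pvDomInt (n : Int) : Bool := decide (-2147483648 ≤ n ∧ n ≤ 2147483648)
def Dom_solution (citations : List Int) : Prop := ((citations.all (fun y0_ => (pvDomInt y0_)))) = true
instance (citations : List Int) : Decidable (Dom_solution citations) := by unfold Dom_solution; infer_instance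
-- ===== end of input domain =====

-- B replaces A's per-point re-sort-and-count scan by a binary search over the candidate
-- point, using the monotonicity of (count ≤ p) − (count ≥ p); objective: faster.


-- ===== PORT A =====
-- 'while point <= len(citations)' as structural recursion on fuel = len(citations),
-- starting at point = 1 (so the fuel exactly covers the iterations).
def solutionLoop (citations : List Int) (answer point : Int) : Nat → Int
  | 0 => answer
  | fuel + 1 =>
    if point ≤ (citations.length : Int) then
      let temp := PySem.List.sorted citations (fun x => x) false
      let sb := temp.foldl
        (fun (sb : Int × Int) i =>
          (if i ≤ point then sb.1 + 1 else sb.1, if point ≤ i then sb.2 + 1 else sb.2))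
        (0, 0)
      solutionLoop citations (if sb.1 = sb.2 then point else answer) (point + 1) fuel
    else answer

def solution (citations : List Int) : Int :=
  solutionLoop citations 0 1 citations.length

-- ===== PORT B =====
-- le = sum(1 for c in citations if c <= p)
def cntLE (citations : List Int) (p : Int) : Int :=
  citations.foldl (fun acc c => if c ≤ p then acc + 1 else acc) 0

-- ge = sum(1 for c in citations if c >= p)
def cntGE (citations : List Int) (p : Int) : Int :=
  citations.foldl (fun acc c => if p ≤ c then acc + 1 else acc) 0

def imbalance (citations : List Int) (p : Int) : Int :=
  cntLE citations p - cntGE citations p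

-- the 'while lo < hi' binary-search loop; fuel = len(citations) bounds hi - lo
def bsearchLoop (citations : List Int) (lo hi : Int) : Nat → Int
  | 0 => lo
  | fuel + 1 =>
    if lo < hi then
      let mid := PySem.Int.floordiv (lo + hi + 1) 2
      if imbalance citations mid ≤ 0 then bsearchLoop citations mid hi fuel
      else bsearchLoop citations lo (mid - 1) fuel
    else lo

def solution_alt (citations : List Int) : Int :=
  let n : Int := citations.length
  if n = 0 then 0
  else if 0 < imbalance citations 1 then 0
  else
    let lo := bsearchLoop citations 1 n citations.length
    if imbalance citations lo = 0 then lo else 0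

-- ===== PRECONDITION & SPEC =====
def Spec_solution (citations : List Int) (out : Int) : Prop := out = solution_alt citations
instance (citations : List Int) (out : Int) : Decidable (Spec_solution citations out) := by unfold Spec_solution; infer_instance

-- ===== CLAIM (what is proved, stated in full; the proofs are below) =====
def Claim_equal_solution : Prop := ∀ (citations : List Int), Dom_solution citations → Spec_solution citations (solution citations)

-- ===== LEMMAS AND PROOFS =====

-- imbalance equals the countP difference
theorem cntLE_eq (citations : List Int) (p : Int) :
    cntLE citations p = (citations.countP (fun c => decide (c ≤ p)) : Int) := by
  unfold cntLE
  rw [PySem.List.foldl_ite_add_one (fun c => c ≤ p)]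
  simp

theorem cntGE_eq (citations : List Int) (p : Int) :
    cntGE citations p = (citations.countP (fun c => decide (p ≤ c)) : Int) := by
  unfold cntGE
  rw [PySem.List.foldl_ite_add_one (fun c => p ≤ c)]
  simp

-- imbalance is monotone in p
theorem imbalance_mono (citations : List Int) {p q : Int} (h : p ≤ q) :
    imbalance citations p ≤ imbalance citations q := by
  unfold imbalance
  rw [cntLE_eq, cntGE_eq, cntLE_eq, cntGE_eq]
  have h1 : citations.countP (fun c => decide (c ≤ p)) ≤
      citations.countP (fun c => decide (c ≤ q)) := by
    apply List.countP_mono_left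
    intro a _ ha
    simp at ha ⊢; omega
  have h2 : citations.countP (fun c => decide (q ≤ c)) ≤
      citations.countP (fun c => decide (p ≤ c)) := by
    apply List.countP_mono_left
    intro a _ ha
    simp at ha ⊢; omega
  omega

-- A's inner pair-fold splits into the two separate count folds
theorem pairFold_eq (p : Int) (l : List Int) (a b : Int) :
    l.foldl (fun (sb : Int × Int) i =>
        (if i ≤ p then sb.1 + 1 else sb.1, if p ≤ i then sb.2 + 1 else sb.2)) (a, b)
      = (l.foldl (fun acc c => if c ≤ p then acc + 1 else acc) a,
         l.foldl (fun acc c => if p ≤ c then acc + 1 else acc) b) := by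
  induction l generalizing a b with
  | nil => rfl
  | cons x xs ih => simp only [List.foldl_cons]; rw [ih]

-- A's per-point test equals 'imbalance = 0' (sorting does not change the counts)
theorem pairFold_sorted_test (citations : List Int) (p : Int) :
    (((PySem.List.sorted citations (fun x => x) false).foldl
        (fun (sb : Int × Int) i =>
          (if i ≤ p then sb.1 + 1 else sb.1, if p ≤ i then sb.2 + 1 else sb.2))
        (0, 0)).1
      = ((PySem.List.sorted citations (fun x => x) false).foldl
        (fun (sb : Int × Int) i =>
          (if i ≤ p then sb.1 + 1 else sb.1, if p ≤ i then sb.2 + 1 else sb.2))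
        (0, 0)).2)
      ↔ imbalance citations p = 0 := by
  rw [pairFold_eq]
  have hperm := PySem.List.sorted_perm citations (fun x => x) false
  show (cntLE _ p = cntGE _ p) ↔ _
  unfold imbalance
  rw [cntLE_eq, cntGE_eq, cntLE_eq, cntGE_eq, hperm.countP_eq, hperm.countP_eq]
  omega

-- characterisation of A's loop, part 1: no zero in [p, n] leaves answer unchanged
theorem loopA_no_zero (citations : List Int) (ans p : Int) (fuel : Nat)
    (hz : ∀ q : Int, p ≤ q → q ≤ (citations.length : Int) → imbalance citations q ≠ 0) :
    solutionLoop citations ans p fuel = ans := by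
  induction fuel generalizing ans p with
  | zero => rfl
  | succ fuel ih =>
    unfold solutionLoop
    split
    · rename_i hle
      show solutionLoop citations
          (if (((PySem.List.sorted citations (fun x => x) false).foldl
              (fun (sb : Int × Int) i =>
                (if i ≤ p then sb.1 + 1 else sb.1, if p ≤ i then sb.2 + 1 else sb.2))
              (0, 0)).1
            = ((PySem.List.sorted citations (fun x => x) false).foldl
              (fun (sb : Int × Int) i =>
                (if i ≤ p then sb.1 + 1 else sb.1, if p ≤ i then sb.2 + 1 else sb.2))
              (0, 0)).2) then p else ans) (p + 1) fuel = ans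
      rw [if_neg, ih _ _ (fun q hq1 hq2 => hz q (by omega) hq2)]
      intro heq
      exact hz p le_rfl hle ((pairFold_sorted_test citations p).mp heq)
    · rfl

-- characterisation of A's loop, part 2: the last zero q0 in [p, n] is returned
theorem loopA_last_zero (citations : List Int) (ans p q0 : Int) (fuel : Nat)
    (h0 : imbalance citations q0 = 0) (hp : p ≤ q0) (hn : q0 ≤ (citations.length : Int))
    (habove : ∀ q : Int, q0 < q → q ≤ (citations.length : Int) → imbalance citations q ≠ 0)
    (hfuel : (citations.length : Int) < p + fuel) :
    solutionLoop citations ans p fuel = q0 := by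
  induction fuel generalizing ans p with
  | zero => omega
  | succ fuel ih =>
    unfold solutionLoop
    rw [if_pos (by omega)]
    by_cases hpq : p = q0
    · subst hpq
      show solutionLoop citations
          (if (((PySem.List.sorted citations (fun x => x) false).foldl
              (fun (sb : Int × Int) i =>
                (if i ≤ p then sb.1 + 1 else sb.1, if p ≤ i then sb.2 + 1 else sb.2))
              (0, 0)).1
            = ((PySem.List.sorted citations (fun x => x) false).foldl
              (fun (sb : Int × Int) i =>
                (if i ≤ p then sb.1 + 1 else sb.1, if p ≤ i then sb.2 + 1 else sb.2))
              (0, 0)).2) then p else ans) (p + 1) fuel = p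
      rw [if_pos ((pairFold_sorted_test citations p).mpr h0)]
      exact loopA_no_zero citations p (p + 1) fuel
        (fun q hq1 hq2 => habove q (by omega) hq2)
    · exact ih _ _ (by omega) (by omega)

-- the binary-search loop returns the greatest point ≤ hi with imbalance ≤ 0
theorem bsearchLoop_spec (citations : List Int) (lo hi : Int) (fuel : Nat)
    (hlh : lo ≤ hi) (hlo : imbalance citations lo ≤ 0)
    (habove : ∀ q : Int, hi < q → q ≤ (citations.length : Int) → 0 < imbalance citations q)
    (hhi : hi ≤ (citations.length : Int)) (hfuel : hi - lo < fuel) :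
    let r := bsearchLoop citations lo hi fuel
    imbalance citations r ≤ 0 ∧ lo ≤ r ∧ r ≤ (citations.length : Int) ∧
      ∀ q : Int, r < q → q ≤ (citations.length : Int) → 0 < imbalance citations q := by
  induction fuel generalizing lo hi with
  | zero => omega
  | succ fuel ih =>
    unfold bsearchLoop
    by_cases hlt : lo < hi
    · rw [if_pos hlt]
      have hmid : lo < PySem.Int.floordiv (lo + hi + 1) 2 ∧
          PySem.Int.floordiv (lo + hi + 1) 2 ≤ hi := by
        have : 2 * PySem.Int.floordiv (lo + hi + 1) 2 ≤ lo + hi + 1 ∧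
            lo + hi + 1 < 2 * PySem.Int.floordiv (lo + hi + 1) 2 + 2 := by
          simp [PySem.Int.floordiv, Int.fdiv_eq_ediv]
          omega
        omega
      set mid := PySem.Int.floordiv (lo + hi + 1) 2 with hmiddef
      by_cases himb : imbalance citations mid ≤ 0
      · rw [if_pos himb]
        exact (ih mid hi (by omega) himb habove hhi (by omega)).imp
          id (fun h => ⟨by omega, h.2.1, h.2.2⟩)
      · rw [if_neg himb]
        have habove' : ∀ q : Int, mid - 1 < q → q ≤ (citations.length : Int) →
            0 < imbalance citations q := by
          intro q hq1 hq2
          by_cases hq3 : hi < q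
          · exact habove q hq3 hq2
          · calc (0:Int) < imbalance citations mid := by omega
              _ ≤ imbalance citations q := imbalance_mono citations (by omega)
        exact ih lo (mid - 1) (by omega) hlo habove' (by omega) (by omega)
    · rw [if_neg hlt]
      exact ⟨hlo, le_rfl, by omega, fun q hq1 hq2 => habove q (by omega) hq2⟩

-- ===== VERDICT (by name: the statement is the Claim_ definition above) =====
theorem solution_spec : Claim_equal_solution := by
  intro citations _
  unfold Spec_solution solution solution_alt
  simp only []
  by_cases hn : (citations.length : Int) = 0
  · rw [if_pos hn]
    unfold solutionLoop
    cases h : citations.length with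
    | zero => rfl
    | succ k => omega
  · rw [if_neg hn]
    have hn1 : (1 : Int) ≤ (citations.length : Int) := by omega
    by_cases h1 : 0 < imbalance citations 1
    · rw [if_pos h1]
      apply loopA_no_zero
      intro q hq1 _
      have := imbalance_mono citations (show (1:Int) ≤ q from hq1)
      omega
    · rw [if_neg h1]
      have hbs := bsearchLoop_spec citations 1 (citations.length : Int)
        citations.length hn1 (by omega)
        (fun q hq1 hq2 => by omega) le_rfl (by omega)
      set r := bsearchLoop citations 1 (citations.length : Int) citations.length with hrdef
      obtain ⟨hr0, hr1, hrn, hrab⟩ := hbs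
      by_cases hz : imbalance citations r = 0
      · rw [if_pos hz]
        exact loopA_last_zero citations 0 1 r citations.length hz hr1 hrn
          (fun q hq1 hq2 => by have := hrab q hq1 hq2; omega) (by omega)
      · rw [if_neg hz]
        apply loopA_no_zero
        intro q hq1 hq2
        by_cases hqr : q ≤ r
        · have := imbalance_mono citations hqr; omega
        · have := hrab q (by omega) hq2; omega
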